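-- pv_equiv track=rewrite | github.com/Pivouane/MetricCount | assignment 3/oom_counter.py | local_method
-- ===== SOURCE A (Python) =====
-- def local_method(str , global_method) :
--     res = ""
--     for meth in global_method :
--         for m in meth :
--             if str.find(m) != -1 :
--                 res = m
--                 break
--     return res
-- ===== SOURCE B (Python) =====
-- def local_method(str, global_method):
--     for meth in reversed(global_method):
--         for m in meth:
--             if m in str:
--                 return m
--     return ""
-- ===== Notes on version B (the rewrite author's own statement) =====
-- stated objective: simpler
-- what changed: B walks the groups in reverse and returns the first match of the first matching group immediately (early exit), instead of A's forward traversal that keeps overwriting an accumulator and always scans every group.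
import Mathlib
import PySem

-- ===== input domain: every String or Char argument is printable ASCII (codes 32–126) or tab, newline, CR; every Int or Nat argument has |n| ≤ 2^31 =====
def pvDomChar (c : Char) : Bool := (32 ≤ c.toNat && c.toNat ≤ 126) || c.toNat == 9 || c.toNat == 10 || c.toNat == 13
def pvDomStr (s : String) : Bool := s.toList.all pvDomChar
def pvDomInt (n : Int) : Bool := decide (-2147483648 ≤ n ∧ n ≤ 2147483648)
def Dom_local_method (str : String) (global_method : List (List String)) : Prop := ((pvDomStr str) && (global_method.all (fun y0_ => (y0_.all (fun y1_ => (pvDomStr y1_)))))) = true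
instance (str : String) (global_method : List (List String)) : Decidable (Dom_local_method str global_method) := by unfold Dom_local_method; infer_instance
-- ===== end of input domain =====

-- B walks the groups in reverse and returns the first match of the first matching group
-- immediately (early exit), instead of A's forward scan overwriting an accumulator (objective: simpler).


-- ===== PORT A =====
-- inner loop of A: 'for m in meth: if str.find(m) != -1: res = m; break'
def pvInnerA (str : String) (res : String) : List String → String
  | [] => res
  | m :: rest => if PySem.Str.find str m ≠ -1 then m else pvInnerA str res rest

def local_method (str : String) (global_method : List (List String)) : String :=
  global_method.foldl (fun res meth => pvInnerA str res meth) ""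

-- ===== PORT B =====
-- inner loop of B: first m of the group with 'm in str' (none if no element matches)
def pvInnerB (str : String) : List String → Option String
  | [] => none
  | m :: rest => if PySem.Str.isIn m str then some m else pvInnerB str rest

-- B's outer loop: 'for meth in reversed(global_method): …return m'; runs on the reversed list
def pvRevLoop (str : String) : List (List String) → String
  | [] => ""
  | meth :: rest =>
    match pvInnerB str meth with
    | some m => m
    | none => pvRevLoop str rest

def local_method_alt (str : String) (global_method : List (List String)) : String :=
  pvRevLoop str global_method.reverse

-- ===== PRECONDITION & SPEC =====
def Spec_local_method (str : String) (global_method : List (List String)) (out : String) : Prop := out = local_method_alt str global_method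
instance (str : String) (global_method : List (List String)) (out : String) : Decidable (Spec_local_method str global_method out) := by unfold Spec_local_method; infer_instance

-- ===== CLAIM (what is proved, stated in full; the proofs are below) =====
def Claim_equal_local_method : Prop := ∀ (str : String) (global_method : List (List String)), Dom_local_method str global_method → Spec_local_method str global_method (local_method str global_method)

-- ===== LEMMAS AND PROOFS =====

theorem pvInnerA_eq_getD (str res : String) (meth : List String) :
    pvInnerA str res meth = (pvInnerB str meth).getD res := by
  induction meth with
  | nil => rfl
  | cons m rest ih =>
    have hiff : (PySem.Str.find str m ≠ -1) ↔ (PySem.Str.isIn m str = true) := by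
      rw [PySem.Str.find_ne_neg_one_iff, PySem.Str.isIn_iff_infix]
    simp only [pvInnerA, pvInnerB]
    by_cases h : PySem.Str.isIn m str = true
    · rw [if_pos (hiff.mpr h), if_pos h]; rfl
    · rw [if_neg (fun hf => h (hiff.mp hf)), if_neg h, ih]

theorem pvRevLoop_eq_findSome? (str : String) (l : List (List String)) :
    pvRevLoop str l = (l.findSome? (pvInnerB str)).getD "" := by
  induction l with
  | nil => rfl
  | cons meth rest ih =>
    simp only [pvRevLoop, List.findSome?]
    cases pvInnerB str meth with
    | some m => rfl
    | none => simpa using ih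

theorem pvFoldl_eq (str : String) (gs : List (List String)) :
    ∀ r, gs.foldl (fun res meth => pvInnerA str res meth) r
        = (gs.reverse.findSome? (pvInnerB str)).getD r := by
  induction gs with
  | nil => intro r; rfl
  | cons g rest ih =>
    intro r
    simp only [List.foldl_cons, List.reverse_cons, List.findSome?_append]
    rw [ih]
    cases h : rest.reverse.findSome? (pvInnerB str) with
    | some m => rfl
    | none => simp [pvInnerA_eq_getD]

-- ===== VERDICT (by name: the statement is the Claim_ definition above) =====
theorem local_method_spec : Claim_equal_local_method := by
  intro str gm _
  unfold Spec_local_method local_method local_method_alt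
  rw [pvFoldl_eq, pvRevLoop_eq_findSome?]
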